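-- pv_equiv track=rewrite | github.com/murai-lab/MEXA-CTP | criteria_embedding/cembed.py | pattern_3
-- ===== SOURCE A (Python) =====
-- def pattern_3(criteria_split):
--     clean_data = []
--     c_ls = []
--     in_c = ''
--     for cs in criteria_split:
--         if 'prior concurrent therapy:' in cs:
--             if len(in_c) > 0:
--                 c_ls.append(in_c)
--             break
--         if 'patient characteristics:' in cs:
--             in_c = cs.replace('patient characteristics:', '')
--         else:
--             if len(in_c) != 0:
--                 in_c += ' ' + cs
--
--     if len(c_ls) > 0:
--         clean_data.append(c_ls)
--     return clean_data
-- ===== SOURCE B (Python) =====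
-- def pattern_3(criteria_split):
--     t = next((i for i, cs in enumerate(criteria_split)
--               if 'prior concurrent therapy:' in cs), None)
--     if t is None:
--         return []
--     rev = criteria_split[:t][::-1]
--     r = next((i for i, cs in enumerate(rev)
--               if 'patient characteristics:' in cs), None)
--     if r is None:
--         return []
--     start = rev[r].replace('patient characteristics:', '')
--     if not start:
--         return []
--     return [[' '.join([start] + rev[:r][::-1])]]
-- ===== Notes on version B (the rewrite author's own statement) =====
-- stated objective: simpler
-- what changed: Replaces A's stateful accumulator loop (with reset-on-marker and break) by direct index searches: find the first 'prior concurrent therapy:' line, the last preceding 'patient characteristics:' line, and join the segment between them with ' '.join.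
import Mathlib
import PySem

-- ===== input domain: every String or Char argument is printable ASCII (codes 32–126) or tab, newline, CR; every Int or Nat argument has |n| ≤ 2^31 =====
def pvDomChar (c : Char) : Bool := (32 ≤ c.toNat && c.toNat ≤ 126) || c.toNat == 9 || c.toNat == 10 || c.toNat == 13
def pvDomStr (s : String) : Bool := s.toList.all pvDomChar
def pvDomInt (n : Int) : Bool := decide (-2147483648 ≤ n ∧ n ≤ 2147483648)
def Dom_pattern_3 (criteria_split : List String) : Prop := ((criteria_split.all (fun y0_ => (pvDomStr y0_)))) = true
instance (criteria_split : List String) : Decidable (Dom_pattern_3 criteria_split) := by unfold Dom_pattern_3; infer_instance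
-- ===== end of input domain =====

-- B replaces A's stateful accumulator loop by direct index searches (first 'prior concurrent
-- therapy:' line, last preceding 'patient characteristics:' line) plus a single ' '.join; simpler.


-- ===== PORT A =====
-- A's for-loop with break, transcribed as structural recursion over the list with the
-- accumulator in_c; the break branch returns the final clean_data directly.
def pattern3_loop (l : List String) (in_c : String) : List (List String) :=
  match l with
  | [] => []                                     -- loop ends without break: c_ls empty
  | cs :: rest =>
    if PySem.Str.isIn "prior concurrent therapy:" cs then
      if PySem.Str.len in_c > 0 then [[in_c]] else []
    else if PySem.Str.isIn "patient characteristics:" cs then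
      pattern3_loop rest (PySem.Str.replace cs "patient characteristics:" "")
    else if PySem.Str.len in_c ≠ 0 then
      pattern3_loop rest (in_c ++ " " ++ cs)
    else
      pattern3_loop rest in_c

def pattern_3 (criteria_split : List String) : List (List String) :=
  pattern3_loop criteria_split ""

-- ===== PORT B =====
-- Source B step for step: the two next(...) index searches are List.findIdx?; the slices
-- criteria_split[:t] and rev[:r] have nonnegative in-range bounds, ported as List.take
-- (exact there); [::-1] is List.reverse; rev[r] is in range (r a found index), ported as getD.
def pattern_3_alt (criteria_split : List String) : List (List String) :=
  match criteria_split.findIdx? (fun cs => PySem.Str.isIn "prior concurrent therapy:" cs) with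
  | none => []
  | some t =>
    let rev := (criteria_split.take t).reverse
    match rev.findIdx? (fun cs => PySem.Str.isIn "patient characteristics:" cs) with
    | none => []
    | some r =>
      let start := PySem.Str.replace (rev.getD r "") "patient characteristics:" ""
      if start = "" then []
      else [[PySem.Str.join " " (start :: (rev.take r).reverse)]]

-- ===== PRECONDITION & SPEC =====
def Spec_pattern_3 (criteria_split : List String) (out : List (List String)) : Prop := out = pattern_3_alt criteria_split
instance (criteria_split : List String) (out : List (List String)) : Decidable (Spec_pattern_3 criteria_split out) := by unfold Spec_pattern_3; infer_instance

-- ===== CLAIM (what is proved, stated in full; the proofs are below) =====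
def Claim_equal_pattern_3 : Prop := ∀ (criteria_split : List String), Dom_pattern_3 criteria_split → Spec_pattern_3 criteria_split (pattern_3 criteria_split)

-- ===== LEMMAS AND PROOFS =====

-- fold that mirrors A's in_c accumulation: append ' ' ++ cs for each further line
def pvJoin (s : String) (ms : List String) : String := ms.foldl (fun a c => a ++ " " ++ c) s

-- characterisation of A's loop from an arbitrary state s
def pvG (l : List String) (s : String) : List (List String) :=
  ((l.findIdx? (fun cs => PySem.Str.isIn "prior concurrent therapy:" cs)).map (fun t =>
    let rev := (l.take t).reverse
    ((rev.findIdx? (fun cs => PySem.Str.isIn "patient characteristics:" cs)).map (fun r =>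
        let start := PySem.Str.replace (rev.getD r "") "patient characteristics:" ""
        if start = "" then [] else [[pvJoin start (rev.take r).reverse]])).getD
      (if s = "" then [] else [[pvJoin s rev.reverse]]))).getD []

theorem pv_len_pos (s : String) (h : s ≠ "") : PySem.Str.len s > 0 := by
  simp only [PySem.Str.len_eq]
  have hne : s.toList ≠ [] := fun hn => h (String.toList_eq_nil_iff.mp hn)
  cases hl : s.toList with
  | nil => exact absurd hl hne
  | cons a t => simp

theorem pv_append_ne (a c : String) : a ++ " " ++ c ≠ "" := by
  intro h
  rw [String.ext_iff] at h
  simp [String.toList_append] at h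

theorem pv_chars_join_cons (sep p q : List Char) (rest : List (List Char)) :
    PySem.Chars.join sep (p :: q :: rest) = PySem.Chars.join sep ((p ++ sep ++ q) :: rest) := by
  cases rest with
  | nil => rw [PySem.Chars.join_cons_cons, PySem.Chars.join_singleton, PySem.Chars.join_singleton]
  | cons r rs =>
    rw [PySem.Chars.join_cons_cons, PySem.Chars.join_cons_cons, PySem.Chars.join_cons_cons]
    simp [List.append_assoc]

theorem pv_join_eq_foldl (ms : List String) : ∀ (a : String),
    PySem.Str.join " " (a :: ms) = pvJoin a ms := by
  induction ms with
  | nil =>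
    intro a
    rw [String.ext_iff, PySem.Str.toList_join]
    simp [pvJoin, PySem.Chars.join_singleton]
  | cons m ms ih =>
    intro a
    have h1 : PySem.Str.join " " (a :: m :: ms) = PySem.Str.join " " ((a ++ " " ++ m) :: ms) := by
      rw [String.ext_iff, PySem.Str.toList_join, PySem.Str.toList_join]
      simp only [List.map_cons, String.toList_append]
      exact pv_chars_join_cons _ _ _ _
    rw [h1, ih]
    simp [pvJoin]

theorem pv_loop_eq_pvG (l : List String) : ∀ (s : String), pattern3_loop l s = pvG l s := by
  induction l with
  | nil => intro s; rfl
  | cons cs rest ih =>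
    intro s
    rw [pattern3_loop, pvG]
    cases h1 : PySem.Str.isIn "prior concurrent therapy:" cs with
    | true =>
      have hf : List.findIdx? (fun cs => PySem.Str.isIn "prior concurrent therapy:" cs) (cs :: rest) = some 0 := by
        rw [List.findIdx?_cons]; simp only [h1, reduceIte]
      rw [hf]
      simp only [reduceIte, Option.map_some, Option.getD_some, List.take_zero,
        List.reverse_nil, List.findIdx?_nil, Option.map_none, Option.getD_none]
      by_cases hs : s = ""
      · subst hs
        simp
      · rw [if_pos (pv_len_pos s hs), if_neg hs]
        rfl
    | false =>
      have hf : List.findIdx? (fun cs => PySem.Str.isIn "prior concurrent therapy:" cs) (cs :: rest) =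
          Option.map (fun i => i + 1) (List.findIdx? (fun cs => PySem.Str.isIn "prior concurrent therapy:" cs) rest) := by
        rw [List.findIdx?_cons]; simp only [h1, Bool.false_eq_true, reduceIte]
      rw [hf]
      simp only [Bool.false_eq_true, reduceIte]
      cases ht : List.findIdx? (fun cs => PySem.Str.isIn "prior concurrent therapy:" cs) rest with
      | none =>
        have hres : ∀ s' : String, pvG rest s' = [] := by
          intro s'; rw [pvG, ht]; rfl
        simp only [Option.map_none, Option.getD_none]
        cases h2 : PySem.Str.isIn "patient characteristics:" cs with
        | true => simp only [reduceIte]; rw [ih, hres]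
        | false =>
          simp only [Bool.false_eq_true, reduceIte]
          split <;> · rw [ih, hres]
      | some t =>
        simp only [Option.map_some, Option.getD_some, List.take_succ_cons, List.reverse_cons,
          List.findIdx?_append, List.findIdx?_cons, List.findIdx?_nil, Option.map_none]
        cases h2 : PySem.Str.isIn "patient characteristics:" cs with
        | true =>
          simp only [reduceIte, Option.map_some]
          rw [ih, pvG, ht]
          simp only [Option.map_some, Option.getD_some]
          cases hr : List.findIdx? (fun cs => PySem.Str.isIn "patient characteristics:" cs) ((rest.take t).reverse) with
          | some r =>
            have hrlt : r < (rest.take t).reverse.length :=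
              (List.findIdx?_eq_some_iff_findIdx_eq.mp hr).1
            simp only [Option.some_or, Option.map_some, Option.getD_some,
              List.getD_eq_getElem?_getD, List.getElem?_append_left hrlt,
              List.take_append_of_le_length (Nat.le_of_lt hrlt)]
          | none =>
            simp only [Option.none_or, Option.map_some, Option.map_none, Option.getD_some,
              Option.getD_none, Nat.zero_add]
            rw [List.getD_eq_getElem?_getD]
            simp only [List.getElem?_append_right (Nat.le_refl _), Nat.sub_self,
              List.getElem?_cons_zero, Option.getD_some, List.take_left, List.reverse_reverse]
        | false =>
          simp only [Bool.false_eq_true, reduceIte, Option.map_none, Option.or_none]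
          cases hr : List.findIdx? (fun cs => PySem.Str.isIn "patient characteristics:" cs) ((rest.take t).reverse) with
          | some r =>
            have hrlt : r < (rest.take t).reverse.length :=
              (List.findIdx?_eq_some_iff_findIdx_eq.mp hr).1
            have hres : ∀ s' : String, pvG rest s' =
                (if PySem.Str.replace ((rest.take t).reverse.getD r "") "patient characteristics:" "" = ""
                 then []
                 else [[pvJoin (PySem.Str.replace ((rest.take t).reverse.getD r "") "patient characteristics:" "")
                         ((rest.take t).reverse.take r).reverse]]) := by
              intro s'
              rw [pvG, ht]
              simp only [Option.map_some, Option.getD_some, hr]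
            simp only [Option.map_some, Option.getD_some,
              List.getD_eq_getElem?_getD, List.getElem?_append_left hrlt,
              List.take_append_of_le_length (Nat.le_of_lt hrlt)]
            simp only [List.getD_eq_getElem?_getD] at hres
            split <;> rw [ih, hres]
          | none =>
            simp only [Option.map_none, Option.getD_none]
            by_cases hs : s = ""
            · rw [if_neg (by simp [hs]), ih, pvG, ht]
              simp only [Option.map_some, Option.getD_some, hr, Option.map_none, Option.getD_none]
              rw [if_pos hs, if_pos hs]
            · have hlen : PySem.Str.len s ≠ 0 := by have := pv_len_pos s hs; omega
              rw [if_pos hlen, ih, pvG, ht]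
              simp only [Option.map_some, Option.getD_some, hr, Option.map_none, Option.getD_none]
              rw [if_neg (pv_append_ne s cs), if_neg hs]
              simp only [List.reverse_append, List.reverse_cons, List.reverse_nil,
                List.nil_append, List.reverse_reverse, List.cons_append]
              rfl

theorem pv_pvG_eq_alt (l : List String) : pvG l "" = pattern_3_alt l := by
  rw [pvG, pattern_3_alt]
  cases List.findIdx? (fun cs => PySem.Str.isIn "prior concurrent therapy:" cs) l with
  | none => rfl
  | some t =>
    simp only [Option.map_some, Option.getD_some]
    cases List.findIdx? (fun cs => PySem.Str.isIn "patient characteristics:" cs) ((l.take t).reverse) with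
    | none => simp
    | some r =>
      simp only [Option.map_some, Option.getD_some]
      split
      · rfl
      · rw [pv_join_eq_foldl]

-- ===== VERDICT (by name: the statement is the Claim_ definition above) =====
theorem pattern_3_spec : Claim_equal_pattern_3 := by
  intro l _
  unfold Spec_pattern_3 pattern_3
  rw [pv_loop_eq_pvG, pv_pvG_eq_alt]
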